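-- pv_equiv track=rewrite | github.com/saman1000/exercises | list-practice.py | shuffle_array
-- ===== SOURCE A (Python) =====
-- def shuffle_array(nums, k):
--     # TODO: implement the function here
--     remained = []
--     index = 0
--     length = len(nums)
--     for sep_index in range(k - 1, length, k):
--         remained += nums[index:sep_index]
--         index = sep_index + 1
--     if index < length:
--         remained += nums[index:length]
--     removed = nums[k - 1:len(nums):k]
--     return remained + removed
-- ===== SOURCE B (Python) =====
-- def shuffle_array(nums, k):
--     # index-membership filter instead of accumulating slice blocks between separators
--     pos = set(range(k - 1, len(nums), k))
--     remained = [nums[i] for i in range(len(nums)) if i not in pos]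
--     removed = nums[k - 1:len(nums):k]
--     return remained + removed
-- ===== Notes on version B (the rewrite author's own statement) =====
-- stated objective: simpler
-- what changed: Replaces the stateful loop that copies slice blocks between consecutive separators with a set of removed positions and one element-wise index filter over the whole list; the removed tail stays the same literal slice.
import Mathlib
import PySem

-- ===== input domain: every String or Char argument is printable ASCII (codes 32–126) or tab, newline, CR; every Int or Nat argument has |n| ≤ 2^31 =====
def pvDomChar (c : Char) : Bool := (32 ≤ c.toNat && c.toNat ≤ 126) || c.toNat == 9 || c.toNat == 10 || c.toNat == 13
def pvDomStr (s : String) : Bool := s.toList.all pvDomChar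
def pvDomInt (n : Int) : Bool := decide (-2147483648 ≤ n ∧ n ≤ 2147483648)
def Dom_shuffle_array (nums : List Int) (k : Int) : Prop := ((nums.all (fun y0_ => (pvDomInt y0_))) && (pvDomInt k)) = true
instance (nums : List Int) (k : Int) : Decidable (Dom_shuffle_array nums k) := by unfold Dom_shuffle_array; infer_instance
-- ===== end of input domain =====

-- B replaces A's slice-block accumulation between separators by an index-membership filter; objective: simpler.


-- ===== PORT A =====
def shuffle_array (nums : List Int) (k : Int) : List Int :=
  let length : Int := (nums.length : Int)
  let st := (PySem.List.pyRange (k - 1) length k).foldl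
      (fun (s : List Int × Int) sep_index =>
        (s.1 ++ PySem.List.slice nums (some s.2) (some sep_index), sep_index + 1))
      (([] : List Int), (0 : Int))
  let remained :=
    if st.2 < length then st.1 ++ PySem.List.slice nums (some st.2) (some length) else st.1
  -- nums[k-1:len(nums):k]; slice? is none exactly at k = 0, where Python raises (excluded by Pre_)
  let removed := (PySem.List.slice? nums (some (k - 1)) (some ((nums.length : Int))) k).getD []
  remained ++ removed

-- ===== PORT B =====
def shuffle_array_alt (nums : List Int) (k : Int) : List Int :=
  let pos : PySem.Set Int := PySem.Set.ofList (PySem.List.pyRange (k - 1) ((nums.length : Int)) k)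
  let remained := ((PySem.List.pyRange 0 ((nums.length : Int)) 1).filter
      (fun i => !(PySem.Set.contains pos i))).map (fun i => PySem.List.pyGetD nums i 0)
  -- nums[k-1:len(nums):k]; slice? is none exactly at k = 0, where Python raises (excluded by Pre_)
  let removed := (PySem.List.slice? nums (some (k - 1)) (some ((nums.length : Int))) k).getD []
  remained ++ removed

-- ===== PRECONDITION & SPEC =====
-- Pre_ excludes only k = 0, where both A and B raise ValueError (range with step 0).
def Pre_shuffle_array (nums : List Int) (k : Int) : Prop := k ≠ 0
instance (nums : List Int) (k : Int) : Decidable (Pre_shuffle_array nums k) := by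
  unfold Pre_shuffle_array; infer_instance
def pvWitness_shuffle_array : List Int × Int := ([1, 2, 3, 4, 5], 2)

def Spec_shuffle_array (nums : List Int) (k : Int) (out : List Int) : Prop := out = shuffle_array_alt nums k
instance (nums : List Int) (k : Int) (out : List Int) : Decidable (Spec_shuffle_array nums k out) := by
  unfold Spec_shuffle_array; infer_instance

-- ===== CLAIM (what is proved, stated in full; the proofs are below) =====
def Claim_equal_shuffle_array : Prop := ∀ (nums : List Int) (k : Int), Dom_shuffle_array nums k → Pre_shuffle_array nums k → Spec_shuffle_array nums k (shuffle_array nums k)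

-- ===== LEMMAS AND PROOFS =====

-- A's loop-plus-tail, started at an arbitrary state (acc, idx) with next separator a
def runA (nums : List Int) (k : Int) (a : Int) (acc : List Int) (idx : Int) : List Int :=
  let st := (PySem.List.pyRange a ((nums.length : Int)) k).foldl
      (fun (s : List Int × Int) sep_index =>
        (s.1 ++ PySem.List.slice nums (some s.2) (some sep_index), sep_index + 1))
      (acc, idx)
  if st.2 < (nums.length : Int) then
    st.1 ++ PySem.List.slice nums (some st.2) (some ((nums.length : Int))) else st.1

-- B's filtered segment over indices [idx, len)
def runB (nums : List Int) (k : Int) (idx : Int) : List Int :=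
  ((PySem.List.pyRange idx ((nums.length : Int)) 1).filter
      (fun i => !(decide (i ∈ PySem.List.pyRange (k - 1) ((nums.length : Int)) k)))).map
    (fun i => PySem.List.pyGetD nums i 0)

lemma pyRange_neg_nil (a b k : Int) (hk : k < 0) (hab : a ≤ b) :
    PySem.List.pyRange a b k = [] := by
  simp only [PySem.List.pyRange]
  split_ifs <;> simp_all <;> omega

lemma pyRange_pos_nil (a b k : Int) (hk : 0 < k) (hab : b ≤ a) :
    PySem.List.pyRange a b k = [] := by
  simp only [PySem.List.pyRange]
  split_ifs <;> simp_all <;> omega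

lemma pyRange_pos_cons (a b k : Int) (hk : 0 < k) (hab : a < b) :
    PySem.List.pyRange a b k = a :: PySem.List.pyRange (a + k) b k := by
  rw [PySem.List.pyRange_of_pos a b hk, PySem.List.pyRange_of_pos (a + k) b hk]
  have hstep : b - a + k - 1 = (b - a - 1) + 1 * k := by ring
  have hdiv : (b - a + k - 1) / k = (b - a - 1) / k + 1 := by
    rw [hstep, Int.add_mul_ediv_right _ _ (by omega : k ≠ 0)]
  have hge : 0 ≤ (b - a - 1) / k := Int.ediv_nonneg (by omega) (by omega)
  have hc1 : (if a < b then ((b - a + k - 1) / k).toNat else 0)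
      = ((b - a - 1) / k).toNat + 1 := by
    rw [if_pos hab, hdiv]; omega
  have hc2 : (if a + k < b then ((b - (a + k) + k - 1) / k).toNat else 0)
      = ((b - a - 1) / k).toNat := by
    by_cases h : a + k < b
    · rw [if_pos h]; congr 2; ring
    · rw [if_neg h]
      have : (b - a - 1) / k = 0 := Int.ediv_eq_zero_of_lt (by omega) (by omega)
      omega
  rw [hc1, hc2, List.range_succ_eq_map, List.map_cons, List.map_map]
  congr 1
  · push_cast; simp
  apply List.map_congr_left
  intro j _
  simp only [Function.comp_apply]
  push_cast
  ring

-- an index in the separator set that is ≥ idx (with k ∣ idx) is at least idx + k - 1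
lemma sep_lower (nums : List Int) (k idx i : Int) (hk : 0 < k) (hdvd : k ∣ idx)
    (hmem : i ∈ PySem.List.pyRange (k - 1) ((nums.length : Int)) k) (hge : idx ≤ i) :
    idx + k - 1 ≤ i := by
  rw [PySem.List.mem_pyRange_iff_of_pos hk] at hmem
  obtain ⟨h1, h2, h3⟩ := hmem
  obtain ⟨t, ht⟩ := hdvd
  obtain ⟨u, hu⟩ := h3
  -- i - (k - 1) = k * u, idx = k * t, i ≥ idx ⇒ u ≥ t + ... ⇒ i ≥ idx + k - 1
  have hut : t ≤ u := by nlinarith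
  have : t + 1 ≤ u + 1 := by omega
  nlinarith

lemma slice_eq_map (nums : List Int) (i j : Int) (h0 : 0 ≤ i) (hij : i ≤ j)
    (hj : j ≤ (nums.length : Int)) :
    PySem.List.slice nums (some i) (some j)
      = (PySem.List.pyRange i j 1).map (fun t => PySem.List.pyGetD nums t 0) := by
  rw [PySem.List.slice_toNat nums h0 (by omega)]
  apply List.ext_getElem
  · simp [PySem.List.length_pyRange_one]
    omega
  · intro t h1 h2
    simp only [List.getElem_take, List.getElem_drop, List.getElem_map,
      PySem.List.getElem_pyRange_one]
    rw [PySem.List.pyGetD_eq_getElem nums 0 (by omega) (by simp at h1 h2 ⊢; omega)]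
    congr 1
    omega

lemma loopA_eq_runB (nums : List Int) (k : Int) (hk : 0 < k) :
    ∀ (m : Nat) (idx : Int) (acc : List Int),
      ((nums.length : Int) - idx).toNat = m → 0 ≤ idx → k ∣ idx →
      runA nums k (idx + k - 1) acc idx = acc ++ runB nums k idx := by
  intro m
  induction m using Nat.strong_induction_on with
  | _ m ih =>
    intro idx acc hm h0 hdvd
    by_cases hlt : idx + k - 1 < (nums.length : Int)
    · -- the loop takes a step: separator a = idx + k - 1, new state (acc ++ nums[idx:a], a + 1)
      have hstep : runA nums k (idx + k - 1) acc idx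
          = runA nums k ((idx + k) + k - 1) (acc ++ PySem.List.slice nums (some idx) (some (idx + k - 1))) (idx + k) := by
        simp only [runA, pyRange_pos_cons _ _ _ hk hlt, List.foldl_cons]
        have : idx + k - 1 + k = idx + k + k - 1 := by ring
        rw [this]
        have : idx + k - 1 + 1 = idx + k := by ring
        rw [this]
      rw [hstep, ih ((nums.length : Int) - (idx + k)).toNat (by omega) (idx + k)
        _ rfl (by omega) (by exact (dvd_add_right hdvd).mpr ⟨1, by ring⟩), List.append_assoc]
      congr 1
      -- runB nums k idx = nums[idx : idx+k-1] ++ runB nums k (idx+k)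
      have ha1 : idx ≤ idx + k - 1 := by omega
      have ha2 : idx + k - 1 ≤ (nums.length : Int) := by omega
      unfold runB
      rw [PySem.List.pyRange_one_append idx (idx + k - 1) ((nums.length : Int)) ha1 ha2,
        PySem.List.pyRange_one_cons hlt, List.filter_append, List.filter_cons]
      have hsep : (idx + k - 1) ∈ PySem.List.pyRange (k - 1) ((nums.length : Int)) k := by
        rw [PySem.List.mem_pyRange_iff_of_pos hk]
        exact ⟨by omega, hlt, by simpa using hdvd⟩
      rw [if_neg (by simp [hsep])]
      have hkeep : (PySem.List.pyRange idx (idx + k - 1) 1).filter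
          (fun i => !(decide (i ∈ PySem.List.pyRange (k - 1) ((nums.length : Int)) k)))
          = PySem.List.pyRange idx (idx + k - 1) 1 := by
        apply List.filter_eq_self.mpr
        intro i hi
        rw [PySem.List.mem_pyRange_one] at hi
        simp only [Bool.not_eq_eq_eq_not, Bool.not_true, decide_eq_false_iff_not]
        intro hmem
        have := sep_lower nums k idx i hk hdvd hmem hi.1
        omega
      rw [hkeep, List.map_append,
        slice_eq_map nums idx (idx + k - 1) h0 ha1 ha2]
      congr 2
      ring
    · -- no separator left: pyRange is empty; the tail nums[idx:] is exactly the kept indices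
      have hnil : PySem.List.pyRange (idx + k - 1) ((nums.length : Int)) k = [] :=
        pyRange_pos_nil _ _ _ hk (by omega)
      simp only [runA, hnil, List.foldl_nil]
      by_cases hidx : idx < (nums.length : Int)
      · rw [if_pos hidx]
        congr 1
        unfold runB
        have hkeep : (PySem.List.pyRange idx ((nums.length : Int)) 1).filter
            (fun i => !(decide (i ∈ PySem.List.pyRange (k - 1) ((nums.length : Int)) k)))
            = PySem.List.pyRange idx ((nums.length : Int)) 1 := by
          apply List.filter_eq_self.mpr
          intro i hi
          rw [PySem.List.mem_pyRange_one] at hi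
          simp only [Bool.not_eq_eq_eq_not, Bool.not_true, decide_eq_false_iff_not]
          intro hmem
          have := sep_lower nums k idx i hk hdvd hmem hi.1
          omega
        rw [hkeep, slice_eq_map nums idx ((nums.length : Int)) h0 (by omega) (by omega)]
      · rw [if_neg hidx]
        unfold runB
        rw [PySem.List.pyRange_one_eq_nil (by omega)]
        simp

-- B's Set-membership test is membership in the separator list
lemma contains_ofList_int (l : List Int) (i : Int) :
    PySem.Set.contains (PySem.Set.ofList l) i = decide (i ∈ l) := by
  simp [PySem.Set.contains, PySem.Set.mem_ofList]

lemma remained_alt_eq_runB (nums : List Int) (k : Int) :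
    ((PySem.List.pyRange 0 ((nums.length : Int)) 1).filter
        (fun i => !(PySem.Set.contains
          (PySem.Set.ofList (PySem.List.pyRange (k - 1) ((nums.length : Int)) k)) i))).map
      (fun i => PySem.List.pyGetD nums i 0) = runB nums k 0 := by
  unfold runB
  congr 1
  apply List.filter_congr
  intro i _
  rw [contains_ofList_int]

-- ===== VERDICT (by name: the statement is the Claim_ definition above) =====
theorem shuffle_array_spec : Claim_equal_shuffle_array := by
  intro nums k _ hpre
  unfold Spec_shuffle_array shuffle_array shuffle_array_alt
  simp only []
  congr 1
  rw [remained_alt_eq_runB]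
  rcases lt_trichotomy k 0 with hk | hk | hk
  · -- negative step: the for-loop range is empty in A, the separator set is empty in B
    have hnil : PySem.List.pyRange (k - 1) ((nums.length : Int)) k = [] :=
      pyRange_neg_nil _ _ _ hk (by omega)
    rw [hnil]
    simp only [List.foldl_nil]
    unfold runB
    rw [hnil]
    by_cases h : (0 : Int) < (nums.length : Int)
    · rw [if_pos h]
      rw [slice_eq_map nums 0 ((nums.length : Int)) le_rfl (by omega) le_rfl]
      simp
    · rw [if_neg h]
      rw [PySem.List.pyRange_one_eq_nil (by omega)]
      simp
  · exact absurd hk hpre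
  · -- positive step: the loop invariant lemma at idx = 0
    have := loopA_eq_runB nums k hk ((nums.length : Int) - 0).toNat 0 [] rfl le_rfl ⟨0, by ring⟩
    simp only [runA, zero_add] at this
    simpa using this
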